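-- pv_equiv track=rewrite | github.com/Revati0419/Computer-Networks-LAB | Assignment_12/IP-Fragementation-calculator.py | ip_fragmentation_calculator
-- ===== SOURCE A (Python) =====
-- def ip_fragmentation_calculator(total_packet_size, mtu, ip_header_size):
--     # Constants
--     max_payload_size = mtu - ip_header_size  # Maximum payload in each fragment
--     fragment_payload_size = (max_payload_size // 8) * 8  # Ensure payload size is a multiple of 8
--     total_payload_size = total_packet_size - ip_header_size  # Total payload size to fragment
--
--     # Initialize variables
--     fragment_list = []
--     offset = 0  # Fragment offset in 8-byte blocks
--     more_fragments = 1  # More fragments flag (1 = more fragments, 0 = last fragment)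
--
--     # Fragmentation process
--     while total_payload_size > fragment_payload_size:
--         fragment_size = fragment_payload_size + ip_header_size
--         fragment_list.append({
--             "Fragment Size": fragment_size,
--             "Offset": offset,
--             "MF": more_fragments
--         })
--
--         total_payload_size -= fragment_payload_size
--         offset += fragment_payload_size // 8  # Update offset in 8-byte blocks
--
--     # Add the last fragment
--     more_fragments = 0  # Last fragment has MF = 0
--     last_fragment_size = total_payload_size + ip_header_size
--     fragment_list.append({
--         "Fragment Size": last_fragment_size,
--         "Offset": offset,
--         "MF": more_fragments
--     })
--
--     return fragment_list
-- ===== SOURCE B (Python) =====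
-- def ip_fragmentation_calculator(total_packet_size, mtu, ip_header_size):
--     # Closed-form: compute the number of full fragments up front instead of a subtraction loop.
--     fragment_payload_size = ((mtu - ip_header_size) // 8) * 8
--     total_payload_size = total_packet_size - ip_header_size
--     n = (total_payload_size - 1) // fragment_payload_size if total_payload_size > fragment_payload_size else 0
--     step = fragment_payload_size // 8
--     fragments = [
--         {"Fragment Size": fragment_payload_size + ip_header_size, "Offset": i * step, "MF": 1}
--         for i in range(n)
--     ]
--     fragments.append({
--         "Fragment Size": total_payload_size - n * fragment_payload_size + ip_header_size,
--         "Offset": n * step,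
--         "MF": 0,
--     })
--     return fragments
-- ===== Notes on version B (the rewrite author's own statement) =====
-- stated objective: alternative
-- what changed: B computes the number of full fragments in closed form ((P-1)//F) and builds the fragment list with a range comprehension deriving each offset arithmetically, instead of A's while-loop that repeatedly subtracts the fragment payload and accumulates the offset; Pre_ excludes only inputs where A's loop never terminates (payload exceeding a non-positive fragment payload size), on which A returns nothing.
import Mathlib
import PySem

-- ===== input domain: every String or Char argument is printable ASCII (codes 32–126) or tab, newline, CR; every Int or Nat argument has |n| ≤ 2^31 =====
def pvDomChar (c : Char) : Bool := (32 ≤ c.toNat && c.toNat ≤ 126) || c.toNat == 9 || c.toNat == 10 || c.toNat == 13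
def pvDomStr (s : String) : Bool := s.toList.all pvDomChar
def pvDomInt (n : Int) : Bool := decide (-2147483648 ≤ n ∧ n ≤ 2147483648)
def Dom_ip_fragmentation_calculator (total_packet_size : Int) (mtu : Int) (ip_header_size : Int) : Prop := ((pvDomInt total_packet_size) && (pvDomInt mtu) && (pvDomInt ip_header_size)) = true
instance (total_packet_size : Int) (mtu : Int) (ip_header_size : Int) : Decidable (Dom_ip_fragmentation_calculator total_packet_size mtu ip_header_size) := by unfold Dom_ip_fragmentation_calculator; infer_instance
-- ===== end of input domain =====

-- B computes the number of full fragments in closed form ((P-1)//F) and builds the list by a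
-- range comprehension, instead of A's subtraction loop (objective: alternative decomposition).
-- Pre_ excludes inputs where A's while-loop never terminates (payload exceeds a non-positive
-- fragment payload size); A returns no value there.


-- ===== PORT A =====
-- A's while-loop; the `0 < F` guard only makes the recursion total: on Pre_ it always holds
-- when the loop condition does, so the [] branch is never taken inside Pre_ (A diverges there).
def pvLoopA (F ihs : Int) (P offset : Int) : List (List (String × Int)) :=
  if _h1 : P > F then
    if _h2 : 0 < F then
      [("Fragment Size", F + ihs), ("Offset", offset), ("MF", 1)] ::
        pvLoopA F ihs (P - F) (offset + PySem.Int.floordiv F 8)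
    else []
  else
    [[("Fragment Size", P + ihs), ("Offset", offset), ("MF", 0)]]
termination_by (P - F).toNat
decreasing_by omega

def ip_fragmentation_calculator (total_packet_size : Int) (mtu : Int) (ip_header_size : Int) : List (List (String × Int)) :=
  pvLoopA (PySem.Int.floordiv (mtu - ip_header_size) 8 * 8) ip_header_size
    (total_packet_size - ip_header_size) 0

-- ===== PORT B =====
def ip_fragmentation_calculator_alt (total_packet_size : Int) (mtu : Int) (ip_header_size : Int) : List (List (String × Int)) :=
  let F := PySem.Int.floordiv (mtu - ip_header_size) 8 * 8
  let P := total_packet_size - ip_header_size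
  let n := if P > F then PySem.Int.floordiv (P - 1) F else 0
  let step := PySem.Int.floordiv F 8
  ((List.range n.toNat).map (fun (i : Nat) =>
      [("Fragment Size", F + ip_header_size), ("Offset", (i : Int) * step), ("MF", 1)]))
    ++ [[("Fragment Size", P - n * F + ip_header_size), ("Offset", n * step), ("MF", 0)]]

-- ===== PRECONDITION & SPEC =====
-- Pre_ excludes exactly the inputs where A's while-loop never terminates: total payload larger
-- than a non-positive 8-aligned fragment payload size.
def Pre_ip_fragmentation_calculator (total_packet_size : Int) (mtu : Int) (ip_header_size : Int) : Prop :=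
  total_packet_size - ip_header_size ≤ PySem.Int.floordiv (mtu - ip_header_size) 8 * 8
  ∨ 0 < PySem.Int.floordiv (mtu - ip_header_size) 8 * 8
instance (total_packet_size : Int) (mtu : Int) (ip_header_size : Int) : Decidable (Pre_ip_fragmentation_calculator total_packet_size mtu ip_header_size) := by unfold Pre_ip_fragmentation_calculator; infer_instance

def pvWitness_ip_fragmentation_calculator : Int × Int × Int := (4000, 1500, 20)

def Spec_ip_fragmentation_calculator (total_packet_size : Int) (mtu : Int) (ip_header_size : Int) (out : List (List (String × Int))) : Prop := out = ip_fragmentation_calculator_alt total_packet_size mtu ip_header_size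
instance (total_packet_size : Int) (mtu : Int) (ip_header_size : Int) (out : List (List (String × Int))) : Decidable (Spec_ip_fragmentation_calculator total_packet_size mtu ip_header_size out) := by unfold Spec_ip_fragmentation_calculator; infer_instance

-- ===== CLAIM (what is proved, stated in full; the proofs are below) =====
def Claim_equal_ip_fragmentation_calculator : Prop := ∀ (total_packet_size : Int) (mtu : Int) (ip_header_size : Int), Dom_ip_fragmentation_calculator total_packet_size mtu ip_header_size → Pre_ip_fragmentation_calculator total_packet_size mtu ip_header_size → Spec_ip_fragmentation_calculator total_packet_size mtu ip_header_size (ip_fragmentation_calculator total_packet_size mtu ip_header_size)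

-- ===== LEMMAS AND PROOFS =====

-- number of full fragments produced by the loop
def pvN (F P : Int) : Int := if P > F then PySem.Int.floordiv (P - 1) F else 0

lemma pvN_step (F P : Int) (hF : 0 < F) (hP : P > F) :
    pvN F P = pvN F (P - F) + 1 := by
  unfold pvN
  rw [PySem.Int.floordiv_eq_ediv_of_pos hF]
  by_cases h : P - F > F
  · rw [if_pos hP, if_pos h, PySem.Int.floordiv_eq_ediv_of_pos hF]
    have : P - 1 = (P - F - 1) + 1 * F := by ring
    rw [this, Int.add_mul_ediv_right _ _ (by omega : F ≠ 0)]
  · rw [if_pos hP, if_neg h]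
    have h1 : (P - 1) / F = 1 := by
      have e : P - 1 = (P - 1 - F) + 1 * F := by ring
      rw [e, Int.add_mul_ediv_right _ _ (by omega : F ≠ 0),
          Int.ediv_eq_zero_of_lt (by omega) (by omega)]
      omega
    omega

lemma pvN_nonneg (F P : Int) (hF : 0 < F) : 0 ≤ pvN F P := by
  unfold pvN
  split
  · rw [PySem.Int.floordiv_eq_ediv_of_pos hF]
    exact Int.ediv_nonneg (by omega) (by omega)
  · exact le_refl 0

lemma pvLoopA_eq (F ihs : Int) (hF : 0 < F) :
    ∀ (k : Nat) (P offset : Int), (P - F).toNat ≤ k →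
    pvLoopA F ihs P offset =
      ((List.range (pvN F P).toNat).map (fun (i : Nat) =>
          [("Fragment Size", F + ihs), ("Offset", offset + (i : Int) * PySem.Int.floordiv F 8), ("MF", 1)]))
        ++ [[("Fragment Size", P - pvN F P * F + ihs),
             ("Offset", offset + pvN F P * PySem.Int.floordiv F 8), ("MF", 0)]] := by
  intro k
  induction k with
  | zero =>
    intro P offset hk
    have hP : ¬ P > F := by omega
    rw [pvLoopA, dif_neg hP]
    have h0 : pvN F P = 0 := by unfold pvN; rw [if_neg hP]
    simp [h0]
  | succ k ih =>
    intro P offset hk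
    by_cases hP : P > F
    · rw [pvLoopA, dif_pos hP, dif_pos hF]
      rw [ih (P - F) (offset + PySem.Int.floordiv F 8) (by omega)]
      rw [pvN_step F P hF hP]
      have hn : 0 ≤ pvN F (P - F) := pvN_nonneg F (P - F) hF
      have htn : (pvN F (P - F) + 1).toNat = (pvN F (P - F)).toNat + 1 := by omega
      rw [htn, List.range_succ_eq_map]
      simp only [List.map_cons, List.map_map, List.cons_append]
      congr 1
      · push_cast
        ring_nf
      congr 1
      · apply List.map_congr_left
        intro i _
        simp only [Function.comp, Nat.succ_eq_add_one]
        push_cast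
        ring_nf
      · have e1 : P - F - pvN F (P - F) * F = P - (pvN F (P - F) + 1) * F := by ring
        have e2 : offset + PySem.Int.floordiv F 8 + pvN F (P - F) * PySem.Int.floordiv F 8
            = offset + (pvN F (P - F) + 1) * PySem.Int.floordiv F 8 := by ring
        rw [e1, e2]
    · rw [pvLoopA, dif_neg hP]
      have h0 : pvN F P = 0 := by unfold pvN; rw [if_neg hP]
      simp [h0]

-- ===== VERDICT (by name: the statement is the Claim_ definition above) =====
theorem ip_fragmentation_calculator_spec : Claim_equal_ip_fragmentation_calculator := by
  intro tps mtu ihs _ hpre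
  unfold Spec_ip_fragmentation_calculator ip_fragmentation_calculator ip_fragmentation_calculator_alt
  set F := PySem.Int.floordiv (mtu - ihs) 8 * 8 with hFdef
  set P := tps - ihs with hPdef
  by_cases hF : 0 < F
  · rw [pvLoopA_eq F ihs hF (P - F).toNat P 0 (le_refl _)]
    simp only [pvN, zero_add]
  · rcases hpre with h | h
    · rw [pvLoopA, dif_neg (by omega : ¬ P > F)]
      have hnp : ¬ F < P := by omega
      simp [hnp]
    · omega
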